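-- pv_equiv track=rewrite | github.com/edequev-commits/market-narrative-app | src/reuters_extractor.py | find_reuters_email
-- ===== SOURCE A (Python) =====
-- def find_reuters_email(emails: list) -> dict | None:
--     ranked = []
--
--     for email in emails:
--         sender = (email.get("from", "") or "").lower()
--         subject = (email.get("subject", "") or "").lower()
--         body = (email.get("body", "") or "").lower()
--
--         score = 0
--
--         if "dailybriefing@thomsonreuters.com" in sender:
--             score += 6
--         if "reuters daily briefing" in subject:
--             score += 5
--         if "reuters" in sender:
--             score += 2
--         if "daily briefing" in subject:
--             score += 2
--         if "reuters.com" in body: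
--             score += 1
--
--         if score > 0:
--             ranked.append((score, email))
--
--     if not ranked:
--         return None
--
--     ranked.sort(key=lambda x: x[0], reverse=True)
--     return ranked[0][1]
-- ===== SOURCE B (Python) =====
-- def find_reuters_email(emails: list) -> dict | None:
--     best_score = 0
--     best_email = None
--
--     for email in emails:
--         sender = (email.get("from", "") or "").lower()
--         subject = (email.get("subject", "") or "").lower()
--         body = (email.get("body", "") or "").lower()
--
--         score = 0
--
--         if "dailybriefing@thomsonreuters.com" in sender:
--             score += 6
--         if "reuters daily briefing" in subject:
--             score += 5
--         if "reuters" in sender: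
--             score += 2
--         if "daily briefing" in subject:
--             score += 2
--         if "reuters.com" in body:
--             score += 1
--
--         if score > best_score:
--             best_score = score
--             best_email = email
--
--     return best_email
-- ===== Notes on version B (the rewrite author's own statement) =====
-- stated objective: simpler
-- what changed: Replaces the build-a-ranked-list-then-stable-sort-descending-and-take-head pipeline with a single pass keeping a running best (strict > keeps the first maximum, matching the stable sort's tie-breaking).
import Mathlib
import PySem

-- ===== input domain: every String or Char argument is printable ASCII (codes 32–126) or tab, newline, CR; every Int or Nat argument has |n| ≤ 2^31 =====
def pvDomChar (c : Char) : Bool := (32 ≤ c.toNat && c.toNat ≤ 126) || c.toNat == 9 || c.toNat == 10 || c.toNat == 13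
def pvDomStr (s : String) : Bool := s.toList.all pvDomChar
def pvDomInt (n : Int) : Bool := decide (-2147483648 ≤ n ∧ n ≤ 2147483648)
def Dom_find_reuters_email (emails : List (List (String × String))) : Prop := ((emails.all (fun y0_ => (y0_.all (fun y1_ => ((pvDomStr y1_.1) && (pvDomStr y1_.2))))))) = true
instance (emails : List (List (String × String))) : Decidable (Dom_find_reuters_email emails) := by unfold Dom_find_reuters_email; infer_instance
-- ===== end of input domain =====

-- B replaces A's build-ranked-list / stable-descending-sort / take-head pipeline with a
-- single running-best pass (strict `>` reproduces the stable sort's first-maximum tie-breaking);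
-- the per-email scoring (pvEmailScore) is identical in both programs.

-- the five keyword checks and weights, shared verbatim by both Pythons
def pvEmailScore (email : List (String × String)) : Int :=
  let sender := PySem.Str.lower (PySem.Dict.getD (PySem.Dict.mk email) "from" "")
  let subject := PySem.Str.lower (PySem.Dict.getD (PySem.Dict.mk email) "subject" "")
  let body := PySem.Str.lower (PySem.Dict.getD (PySem.Dict.mk email) "body" "")
  let score : Int := 0
  let score := if PySem.Str.isIn "dailybriefing@thomsonreuters.com" sender then score + 6 else score
  let score := if PySem.Str.isIn "reuters daily briefing" subject then score + 5 else score
  let score := if PySem.Str.isIn "reuters" sender then score + 2 else score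
  let score := if PySem.Str.isIn "daily briefing" subject then score + 2 else score
  let score := if PySem.Str.isIn "reuters.com" body then score + 1 else score
  score

-- ===== PORT A =====
def find_reuters_email (emails : List (List (String × String))) : Option (List (String × String)) :=
  let ranked : List (Int × List (String × String)) :=
    emails.foldl (fun ranked email =>
      let score := pvEmailScore email
      if score > 0 then ranked ++ [(score, email)] else ranked) []
  if ranked.isEmpty then none
  else
    match PySem.List.sorted ranked (fun x => x.1) true with
    | [] => none
    | x :: _ => some x.2

-- ===== PORT B =====
def find_reuters_email_alt (emails : List (List (String × String))) : Option (List (String × String)) :=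
  (emails.foldl (fun best email =>
      let score := pvEmailScore email
      if score > best.1 then (score, some email) else best)
    ((0 : Int), (none : Option (List (String × String))))).2

-- ===== PRECONDITION & SPEC =====
def Spec_find_reuters_email (emails : List (List (String × String))) (out : Option (List (String × String))) : Prop := out = find_reuters_email_alt emails
instance (emails : List (List (String × String))) (out : Option (List (String × String))) : Decidable (Spec_find_reuters_email emails out) := by unfold Spec_find_reuters_email; infer_instance

-- ===== CLAIM (what is proved, stated in full; the proofs are below) =====
def Claim_equal_find_reuters_email : Prop := ∀ (emails : List (List (String × String))), Dom_find_reuters_email emails → Spec_find_reuters_email emails (find_reuters_email emails)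

-- ===== LEMMAS AND PROOFS =====

-- proof-side abbreviations
def pvIns (x : Int × List (String × String)) (s : List (Int × List (String × String))) :
    List (Int × List (String × String)) :=
  PySem.List.insertBy (fun a b => decide (b.1 < a.1)) x s

-- one unfolding step of insertBy on a cons, for the reverse-sorted-by-score order
theorem pvIns_cons (x h : Int × List (String × String)) (t : List (Int × List (String × String))) :
    pvIns x (h :: t) = if h.1 < x.1 then x :: h :: t else h :: pvIns x t := by
  simp [pvIns, PySem.List.insertBy]

-- the rank-list fold commuted past the insertion-sort fold
theorem pvSort_ranked (f : List (String × String) → Int) (emails : List (List (String × String)))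
    (acc : List (Int × List (String × String))) (s : List (Int × List (String × String))) :
    (emails.foldl (fun ranked email =>
        let score := f email
        if score > 0 then ranked ++ [(score, email)] else ranked) acc).foldl
      (fun st x => pvIns x st) s
    = emails.foldl (fun st email =>
        let score := f email
        if score > 0 then pvIns (score, email) st else st) (acc.foldl (fun st x => pvIns x st) s) := by
  induction emails generalizing acc with
  | nil => rfl
  | cons e rest ih =>
      simp only [List.foldl_cons]
      by_cases h : f e > 0
      · simp only [if_pos h, ih, List.foldl_append, List.foldl_cons, List.foldl_nil]
      · simp only [if_neg h, ih]

-- invariant linking the partially built sorted list with B's running best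
def pvInv (t : List (Int × List (String × String)))
    (best : Int × Option (List (String × String))) : Prop :=
  (t = [] ∧ best = (0, none)) ∨
  (∃ h tl, t = h :: tl ∧ best = (h.1, some h.2) ∧ 0 < h.1)

theorem pvMain (f : List (String × String) → Int) (emails : List (List (String × String)))
    (t : List (Int × List (String × String)))
    (best : Int × Option (List (String × String)))
    (hinv : pvInv t best) :
    ((emails.foldl (fun st email =>
        let score := f email
        if score > 0 then pvIns (score, email) st else st) t).head?.map Prod.snd)
    = (emails.foldl (fun b email =>
        let score := f email
        if score > b.1 then (score, some email) else b) best).2 := by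
  induction emails generalizing t best with
  | nil =>
      rcases hinv with ⟨ht, hb⟩ | ⟨h, tl, ht, hb, hpos⟩ <;> subst ht <;> subst hb <;> simp
  | cons e rest ih =>
      simp only [List.foldl_cons]
      rcases hinv with ⟨ht, hb⟩ | ⟨h, tl, ht, hb, hpos⟩
      · subst ht; subst hb
        by_cases hs : f e > 0
        · simp only [if_pos hs]
          exact ih _ _ (Or.inr ⟨(f e, e), [], by simp [pvIns, PySem.List.insertBy], rfl, hs⟩)
        · simp only [if_neg hs]
          exact ih _ _ (Or.inl ⟨rfl, rfl⟩)
      · subst ht; subst hb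
        by_cases hs : f e > 0
        · simp only [if_pos hs, pvIns_cons]
          by_cases hlt : h.1 < f e
          · simp only [if_pos hlt]
            exact ih _ _ (Or.inr ⟨(f e, e), h :: tl, rfl, rfl, hs⟩)
          · simp only [if_neg hlt]
            exact ih _ _ (Or.inr ⟨h, pvIns (f e, e) tl, rfl, rfl, hpos⟩)
        · have hlt : ¬ f e > h.1 := by omega
          simp only [if_neg hs, if_neg hlt]
          exact ih _ _ (Or.inr ⟨h, tl, rfl, rfl, hpos⟩)

-- ===== VERDICT (by name: the statement is the Claim_ definition above) =====
theorem find_reuters_email_spec : Claim_equal_find_reuters_email := by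
  intro emails _
  unfold Spec_find_reuters_email find_reuters_email find_reuters_email_alt
  simp only []
  set ranked := emails.foldl (fun ranked email =>
      let score := pvEmailScore email
      if score > 0 then ranked ++ [(score, email)] else ranked) [] with hranked
  have hsort : PySem.List.sorted ranked (fun x => x.1) true
      = emails.foldl (fun st email =>
          let score := pvEmailScore email
          if score > 0 then pvIns (score, email) st else st) [] := by
    rw [PySem.List.sorted_rev_eq_foldl_insertBy, hranked]
    exact pvSort_ranked pvEmailScore emails [] []
  have hmain := pvMain pvEmailScore emails [] (0, none) (Or.inl ⟨rfl, rfl⟩)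
  rw [← hsort] at hmain
  by_cases hemp : ranked.isEmpty
  · have : ranked = [] := by simpa [List.isEmpty_iff] using hemp
    have hse : PySem.List.sorted ranked (fun x => x.1) true = [] := by
      simp [PySem.List.sorted_eq_nil_iff, this]
    rw [hse] at hmain
    simp only [List.head?_nil, Option.map_none] at hmain
    simp [hemp, ← hmain]
  · have hne : ranked ≠ [] := by simpa [List.isEmpty_iff] using hemp
    have hsne : PySem.List.sorted ranked (fun x => x.1) true ≠ [] := by
      simpa [PySem.List.sorted_eq_nil_iff] using hne
    rw [if_neg (by simpa [List.isEmpty_iff] using hne)]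
    cases hS : PySem.List.sorted ranked (fun x => x.1) true with
    | nil => exact absurd hS hsne
    | cons x xs =>
        rw [hS] at hmain
        simpa using hmain
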